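-- pv_equiv track=rewrite | github.com/searsam1/theEdabitProject | Python/gapful/gapful.py | gapful
-- ===== SOURCE A (Python) =====
-- def is_gapful(n):
-- 	return not n % int(str(n)[0] + str(n)[-1])
--
-- def gapful(n):
--
-- 	if n <= 100:
-- 		return 100
-- 	n_copy = n
-- 	lower = []
-- 	upper = []
--
-- 	while not is_gapful(n_copy):
-- 		n_copy -= 1
-- 	lower.append(n_copy)
-- 	n_copy = n
-- 	while not is_gapful(n_copy):
-- 		n_copy += 1
-- 	upper.append(n_copy)
--
-- 	if lower[0] == upper[0]:
-- 		return n
-- 	if n - lower[0] <  upper[0] - n: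
-- 		return lower[0]
-- 	elif n - lower[0] >  upper[0] - n:
-- 		return upper[0]
-- 	else:
-- 		return lower[0]
-- ===== SOURCE B (Python) =====
-- def is_gapful(n):
-- 	return not n % int(str(n)[0] + str(n)[-1])
--
-- def gapful(n):
-- 	if n <= 100:
-- 		return 100
-- 	d = 0
-- 	while True:
-- 		if is_gapful(n - d):
-- 			return n - d
-- 		if is_gapful(n + d):
-- 			return n + d
-- 		d += 1
-- ===== Notes on version B (the rewrite author's own statement) =====
-- stated objective: simpler
-- what changed: Replaced A's two sequential while-loops (separate downward and upward searches collected into lists) plus a three-way distance-comparison branch ladder by a single expanding-radius loop that probes the lower candidate before the upper at each growing radius, which yields the nearest gapful number with tie-to-lower directly.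
import Mathlib
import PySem

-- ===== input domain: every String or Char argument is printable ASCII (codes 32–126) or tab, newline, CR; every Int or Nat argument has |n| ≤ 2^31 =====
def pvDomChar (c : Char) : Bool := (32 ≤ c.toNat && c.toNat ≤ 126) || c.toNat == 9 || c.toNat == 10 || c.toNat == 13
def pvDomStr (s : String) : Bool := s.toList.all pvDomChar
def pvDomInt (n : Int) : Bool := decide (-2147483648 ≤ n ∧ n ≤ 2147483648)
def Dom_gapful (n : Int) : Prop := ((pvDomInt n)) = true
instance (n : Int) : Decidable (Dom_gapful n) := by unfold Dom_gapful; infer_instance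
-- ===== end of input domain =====

-- B replaces A's two sequential while-loops and distance-comparison branch ladder with one
-- expanding-radius loop (probe the lower candidate, then the upper, at each growing radius); objective: simpler.

-- ===== PORT A =====
-- is_gapful(n) = not n % int(str(n)[0] + str(n)[-1]); the none/zero fallbacks are unreachable
-- for the arguments ≥ 100 both programs feed it (Python would raise there; neither port reaches them).
def isGapful (n : Int) : Bool :=
  let s := PySem.Int.toChars n
  match PySem.List.pyGet? s 0, PySem.List.pyGet? s (-1) with
  | some a, some b =>
      match PySem.Int.ofChars? [a, b] with
      | some d => if d = 0 then false else PySem.Int.mod n d == 0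
      | none => false
  | _, _ => false

-- the first 'while not is_gapful: n_copy -= 1' loop (fuel bounds the steps; never exhausted on Dom)
def findDown : Nat → Int → Int
  | 0, m => m
  | f+1, m => if isGapful m then m else findDown f (m-1)

-- the second 'while not is_gapful: n_copy += 1' loop
def findUp : Nat → Int → Int
  | 0, m => m
  | f+1, m => if isGapful m then m else findUp f (m+1)

def gapful (n : Int) : Int :=
  if n ≤ 100 then 100
  else
    let lower := findDown n.toNat n
    let upper := findUp 10000000000 n
    if lower == upper then n
    else if n - lower < upper - n then lower
    else if n - lower > upper - n then upper
    else lower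

-- ===== PORT B =====
-- the 'while True: test n-d, test n+d, d += 1' loop of Source B
def expandSearch : Nat → Int → Int → Int
  | 0, _, d => d
  | f+1, n, d =>
      if isGapful (n - d) then n - d
      else if isGapful (n + d) then n + d
      else expandSearch f n (d+1)

def gapful_alt (n : Int) : Int :=
  if n ≤ 100 then 100 else expandSearch 10000000000 n 0

-- ===== PRECONDITION & SPEC =====
def Spec_gapful (n : Int) (out : Int) : Prop := out = gapful_alt n
instance (n : Int) (out : Int) : Decidable (Spec_gapful n out) := by unfold Spec_gapful; infer_instance

-- ===== CLAIM (what is proved, stated in full; the proofs are below) =====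
def Claim_equal_gapful : Prop := ∀ (n : Int), Dom_gapful n → Spec_gapful n (gapful n)

-- ===== LEMMAS AND PROOFS =====

theorem isGapful_100 : isGapful 100 = true := by decide

theorem isGapful_1e10 : isGapful 10000000000 = true := by decide

theorem findDown_eq (fuel : Nat) : ∀ (m : Int) (i : Nat), i < fuel →
    isGapful (m - i) = true → (∀ j : Nat, j < i → isGapful (m - j) = false) →
    findDown fuel m = m - i := by
  induction fuel with
  | zero => intro m i h; omega
  | succ f ih =>
    intro m i hi hgap hmin
    by_cases h0 : isGapful m = true
    · have : i = 0 := by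
        by_contra hne
        have h00 := hmin 0 (by omega)
        simp at h00
        simp [h00] at h0
      subst this
      simp [findDown, h0]
    · have hi0 : i ≠ 0 := by
        intro h; subst h; simp at hgap; exact h0 hgap
      obtain ⟨i', rfl⟩ : ∃ i', i = i' + 1 := ⟨i - 1, by omega⟩
      have : findDown f (m - 1) = (m - 1) - i' := by
        apply ih (m - 1) i' (by omega)
        · have : (m : Int) - 1 - i' = m - (i' + 1 : Nat) := by push_cast; ring
          rw [this]; exact hgap
        · intro j hj
          have : (m : Int) - 1 - j = m - (j + 1 : Nat) := by push_cast; ring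
          rw [this]; exact hmin (j+1) (by omega)
      simp only [findDown, h0]
      rw [this]; push_cast; ring

theorem findUp_eq (fuel : Nat) : ∀ (m : Int) (i : Nat), i < fuel →
    isGapful (m + i) = true → (∀ j : Nat, j < i → isGapful (m + j) = false) →
    findUp fuel m = m + i := by
  induction fuel with
  | zero => intro m i h; omega
  | succ f ih =>
    intro m i hi hgap hmin
    by_cases h0 : isGapful m = true
    · have : i = 0 := by
        by_contra hne
        have h00 := hmin 0 (by omega)
        simp at h00
        simp [h00] at h0
      subst this
      simp [findUp, h0]
    · have hi0 : i ≠ 0 := by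
        intro h; subst h; simp at hgap; exact h0 hgap
      obtain ⟨i', rfl⟩ : ∃ i', i = i' + 1 := ⟨i - 1, by omega⟩
      have : findUp f (m + 1) = (m + 1) + i' := by
        apply ih (m + 1) i' (by omega)
        · have : (m : Int) + 1 + i' = m + (i' + 1 : Nat) := by push_cast; ring
          rw [this]; exact hgap
        · intro j hj
          have : (m : Int) + 1 + j = m + (j + 1 : Nat) := by push_cast; ring
          rw [this]; exact hmin (j+1) (by omega)
      simp only [findUp, h0]
      rw [this]; push_cast; ring

theorem expand_eq (n : Int) (dL dU : Nat)
    (hL : isGapful (n - dL) = true) (hU : isGapful (n + dU) = true)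
    (hLmin : ∀ j : Nat, j < dL → isGapful (n - j) = false)
    (hUmin : ∀ j : Nat, j < dU → isGapful (n + j) = false) :
    ∀ (fuel k : Nat), k ≤ min dL dU → min dL dU - k < fuel →
    expandSearch fuel n k = if dL ≤ dU then n - dL else n + dU := by
  intro fuel
  induction fuel with
  | zero => intro k h1 h2; omega
  | succ f ih =>
    intro k hk hf
    by_cases hkr : k = min dL dU
    · subst hkr
      by_cases hld : dL ≤ dU
      · have hm : min dL dU = dL := by omega
        simp only [expandSearch, hm, hL, if_true, if_pos hld]
      · have hm : min dL dU = dU := by omega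
        have h1 : isGapful (n - (dU : Int)) = false := hLmin dU (by omega)
        simp only [expandSearch, hm, h1, hU, if_false, if_true, Bool.false_eq_true, if_neg hld]
    · have hk' : k < min dL dU := by omega
      have h1 : isGapful (n - (k : Int)) = false := hLmin k (by omega)
      have h2 : isGapful (n + (k : Int)) = false := hUmin k (by omega)
      have hrec := ih (k+1) (by omega) (by omega)
      simp only [expandSearch, h1, h2, Bool.false_eq_true, if_false]
      have : (k : Int) + 1 = ((k + 1 : Nat) : Int) := by push_cast; ring
      rw [this, hrec]

-- ===== VERDICT (by name: the statement is the Claim_ definition above) =====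
theorem gapful_spec : Claim_equal_gapful := by
  intro n hdom
  unfold Spec_gapful
  by_cases hle : n ≤ 100
  · simp [gapful, gapful_alt, hle]
  · have hgt : 100 < n := by omega
    have hbound : n ≤ 2147483648 := by
      unfold Dom_gapful pvDomInt at hdom
      have := of_decide_eq_true hdom
      omega
    have hP : ∃ i : Nat, isGapful (n - i) = true := by
      refine ⟨(n - 100).toNat, ?_⟩
      have : n - ((n - 100).toNat : Int) = 100 := by omega
      rw [this]; exact isGapful_100
    have hQ : ∃ j : Nat, isGapful (n + j) = true := by
      refine ⟨(10000000000 - n).toNat, ?_⟩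
      have : n + ((10000000000 - n).toNat : Int) = 10000000000 := by omega
      rw [this]; exact isGapful_1e10
    set dL := Nat.find hP with hdL
    set dU := Nat.find hQ with hdU
    have hLspec : isGapful (n - dL) = true := Nat.find_spec hP
    have hUspec : isGapful (n + dU) = true := Nat.find_spec hQ
    have hLmin : ∀ j : Nat, j < dL → isGapful (n - j) = false := by
      intro j hj
      have := Nat.find_min hP hj
      simpa using this
    have hUmin : ∀ j : Nat, j < dU → isGapful (n + j) = false := by
      intro j hj
      have := Nat.find_min hQ hj
      simpa using this
    have hdLb : dL ≤ (n - 100).toNat := Nat.find_min' hP (by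
      have : n - ((n - 100).toNat : Int) = 100 := by omega
      rw [this]; exact isGapful_100)
    have hdUb : dU ≤ (10000000000 - n).toNat := Nat.find_min' hQ (by
      have : n + ((10000000000 - n).toNat : Int) = 10000000000 := by omega
      rw [this]; exact isGapful_1e10)
    have hlower : findDown n.toNat n = n - dL :=
      findDown_eq n.toNat n dL (by omega) hLspec hLmin
    have hupper : findUp 10000000000 n = n + dU :=
      findUp_eq 10000000000 n dU (by omega) hUspec hUmin
    have hexp : expandSearch 10000000000 n 0 =
        if dL ≤ dU then n - (dL : Int) else n + dU := by
      have := expand_eq n dL dU hLspec hUspec hLmin hUmin 10000000000 0 (by omega) (by omega)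
      simpa using this
    simp only [gapful, gapful_alt, if_neg hle, hlower, hupper, hexp, beq_iff_eq]
    have hdl0 : (0 : Int) ≤ dL := Int.natCast_nonneg _
    have hdu0 : (0 : Int) ≤ dU := Int.natCast_nonneg _
    split_ifs with h1 h2 h3 h4 h5 h6 h7 <;> try omega
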